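-- pv_equiv track=rewrite | github.com/DravaMmonk/gait-research-platform | hound_forward/agent_system/chat/reasoner.py | _format_available_tools
-- ===== SOURCE A (Python) =====
-- from typing import Any
--
-- def _format_available_tools(available_tools: list[dict[str, Any]]) -> str:
--     if not available_tools:
--         return "No callable tools are currently registered for this research agent."
--
--     grouped_tools: dict[str, list[dict[str, Any]]] = {}
--     for tool in available_tools:
--         grouped_tools.setdefault(str(tool.get("scope", "unknown")), []).append(tool)
--
--     sections: list[str] = ["I can call the following registered tools:"]
--     for scope in sorted(grouped_tools):
--         tools = sorted(grouped_tools[scope], key=lambda item: str(item.get("name", "")))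
--         label = "Graph execution tools" if scope == "graph_execution" else "Platform registry tools"
--         sections.append(f"{label}:")
--         for tool in tools:
--             sections.append(
--                 f"- {tool.get('name', 'unknown')}: {tool.get('description', 'No description available.')}"
--             )
--     return "\n".join(sections)
-- ===== SOURCE B (Python) =====
-- def _format_available_tools(available_tools):
--     if not available_tools:
--         return "No callable tools are currently registered for this research agent."
--
--     # One globally ordered list (stable two-pass sort: by name, then by scope)
--     # replaces the grouping dict and the per-group sorts; headers are emitted
--     # in a single scan whenever the scope changes.
--     ordered = sorted(available_tools, key=lambda t: str(t.get("name", "")))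
--     ordered = sorted(ordered, key=lambda t: str(t.get("scope", "unknown")))
--
--     lines = ["I can call the following registered tools:"]
--     prev = None
--     for tool in ordered:
--         scope = str(tool.get("scope", "unknown"))
--         if scope != prev:
--             label = "Graph execution tools" if scope == "graph_execution" else "Platform registry tools"
--             lines.append(label + ":")
--             prev = scope
--         lines.append(
--             f"- {tool.get('name', 'unknown')}: {tool.get('description', 'No description available.')}"
--         )
--     return "\n".join(lines)
-- ===== Notes on version B (the rewrite author's own statement) =====
-- stated objective: alternative
-- what changed: B replaces A's scope-grouping dict plus a per-scope sort inside the output loop by one globally ordered list (stable two-pass sort: by name, then by scope) formatted in a single scan that emits a scope header whenever the scope changes.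
import Mathlib
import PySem

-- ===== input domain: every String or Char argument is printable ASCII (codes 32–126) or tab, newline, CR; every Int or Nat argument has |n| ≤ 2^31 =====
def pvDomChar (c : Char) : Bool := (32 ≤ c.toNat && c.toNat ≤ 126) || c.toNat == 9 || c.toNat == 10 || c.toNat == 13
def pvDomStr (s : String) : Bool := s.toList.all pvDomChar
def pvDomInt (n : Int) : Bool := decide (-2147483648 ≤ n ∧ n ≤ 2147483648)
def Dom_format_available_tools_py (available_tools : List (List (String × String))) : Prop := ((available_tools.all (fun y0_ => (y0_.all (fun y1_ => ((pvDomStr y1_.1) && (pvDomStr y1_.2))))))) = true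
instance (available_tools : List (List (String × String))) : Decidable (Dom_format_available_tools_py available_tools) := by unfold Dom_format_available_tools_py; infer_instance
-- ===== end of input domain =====

-- B replaces A's grouping dict + per-group sorts by one globally sorted list (stable
-- two-pass sort: name, then scope) formatted in a single scan that emits a header
-- whenever the scope changes (objective: idiomatic/alternative, same output).

-- ===== PORT A =====
-- shared helper: Python's tool.get(k, dflt) on the assoc-list dict (first match wins)
def pvGetD (d : List (String × String)) (k dflt : String) : String :=
  match d with
  | [] => dflt
  | (k', v) :: rest => if k' == k then v else pvGetD rest k dflt

-- the f-string bullet line (identical in both Pythons)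
def pvBullet (tool : List (String × String)) : String :=
  "- " ++ pvGetD tool "name" "unknown" ++ ": " ++ pvGetD tool "description" "No description available."

-- the scope label (identical conditional expression in both Pythons)
def pvLabel (scope : String) : String :=
  if scope == "graph_execution" then "Graph execution tools" else "Platform registry tools"

def format_available_tools_py (available_tools : List (List (String × String))) : String :=
  if available_tools = [] then
    "No callable tools are currently registered for this research agent."
  else
    let grouped : PySem.Dict String (List (List (String × String))) :=
      available_tools.foldl
        (fun d tool => d.modify (pvGetD tool "scope" "unknown") [] (fun l => l ++ [tool]))
        PySem.Dict.empty
    let sections : List String :=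
      (PySem.List.sorted grouped.keys (fun c => c) false).foldl
        (fun acc scope =>
          let tools := PySem.List.sorted (grouped.getD scope []) (fun t => pvGetD t "name" "") false
          tools.foldl (fun acc2 tool => acc2 ++ [pvBullet tool]) (acc ++ [pvLabel scope ++ ":"]))
        ["I can call the following registered tools:"]
    PySem.Str.join "\n" sections

-- ===== PORT B =====
def format_available_tools_py_alt (available_tools : List (List (String × String))) : String :=
  if available_tools = [] then
    "No callable tools are currently registered for this research agent."
  else
    let ordered :=
      PySem.List.sorted
        (PySem.List.sorted available_tools (fun t => pvGetD t "name" "") false)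
        (fun t => pvGetD t "scope" "unknown") false
    let final :=
      ordered.foldl
        (fun (st : List String × Option String) tool =>
          let scope := pvGetD tool "scope" "unknown"
          if st.2 = some scope then (st.1 ++ [pvBullet tool], st.2)
          else (st.1 ++ [pvLabel scope ++ ":", pvBullet tool], some scope))
        (["I can call the following registered tools:"], (none : Option String))
    PySem.Str.join "\n" final.1

-- ===== PRECONDITION & SPEC =====
def Spec_format_available_tools_py (available_tools : List (List (String × String))) (out : String) : Prop := out = format_available_tools_py_alt available_tools
instance (available_tools : List (List (String × String))) (out : String) : Decidable (Spec_format_available_tools_py available_tools out) := by unfold Spec_format_available_tools_py; infer_instance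

-- ===== CLAIM (what is proved, stated in full; the proofs are below) =====
def Claim_equal_format_available_tools_py : Prop := ∀ (available_tools : List (List (String × String))), Dom_format_available_tools_py available_tools → Spec_format_available_tools_py available_tools (format_available_tools_py available_tools)

-- ===== LEMMAS AND PROOFS =====

-- abbreviations for the two sort keys
def pvKS (t : List (String × String)) : String := pvGetD t "scope" "unknown"
def pvKN (t : List (String × String)) : String := pvGetD t "name" ""

-- insertBy facts -------------------------------------------------------------
theorem insertBy_nil {α : Type} (p : α → α → Bool) (a : α) :
    PySem.List.insertBy p a [] = [a] := rfl

theorem insertBy_cons {α : Type} (p : α → α → Bool) (a y : α) (ys : List α) :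
    PySem.List.insertBy p a (y :: ys) =
      if p a y then a :: y :: ys else y :: PySem.List.insertBy p a ys := rfl

theorem insertBy_append_no_trigger {α : Type} (p : α → α → Bool) (a : α) (u v : List α)
    (h : ∀ y ∈ u, p a y = false) :
    PySem.List.insertBy p a (u ++ v) = u ++ PySem.List.insertBy p a v := by
  induction u with
  | nil => simp
  | cons y u ih =>
      have hy := h y (by simp)
      simp only [List.cons_append, insertBy_cons, hy, Bool.false_eq_true, if_false]
      rw [ih (fun z hz => h z (by simp [hz]))]

theorem insertBy_all_trigger {α : Type} (p : α → α → Bool) (a : α) (m : List α)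
    (h : ∀ y ∈ m, p a y = true) :
    PySem.List.insertBy p a m = a :: m := by
  cases m with
  | nil => rfl
  | cons y ys => simp [insertBy_cons, h y (by simp)]

theorem sorted_snoc {α : Type} (key : α → String) (xs : List α) (a : α) :
    PySem.List.sorted (xs ++ [a]) key false =
      PySem.List.insertBy (fun p q => decide (key p < key q)) a (PySem.List.sorted xs key false) := by
  rw [PySem.List.sorted_eq_foldl_insertBy, PySem.List.sorted_eq_foldl_insertBy, List.foldl_append]
  rfl

-- filter commutes with the stable sort ---------------------------------------
theorem filter_insertBy_pos {α : Type} (key : α → String) (p : α → Bool) (a : α)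
    (l : List α) (hl : l.Pairwise (fun x y => key x ≤ key y)) (hpa : p a = true) :
    (PySem.List.insertBy (fun x y => decide (key x < key y)) a l).filter p =
      PySem.List.insertBy (fun x y => decide (key x < key y)) a (l.filter p) := by
  induction l with
  | nil => simp [insertBy_nil, hpa]
  | cons y l ih =>
      rcases List.pairwise_cons.mp hl with ⟨hy, hl'⟩
      by_cases hlt : key a < key y
      · rw [insertBy_all_trigger _ _ _ (fun z hz => by
          rcases List.mem_cons.mp hz with rfl | hz
          · simp [hlt]
          · exact decide_eq_true (lt_of_lt_of_le hlt (hy z hz)))]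
        rw [List.filter_cons_of_pos hpa]
        rw [insertBy_all_trigger _ _ _ (fun z hz => by
          have hz' := List.mem_filter.mp hz |>.1
          rcases List.mem_cons.mp hz' with rfl | hz'
          · simp [hlt]
          · exact decide_eq_true (lt_of_lt_of_le hlt (hy z hz')))]
      · rw [insertBy_cons]
        simp only [decide_eq_true_eq, hlt, if_false]
        by_cases hpy : p y = true
        · rw [List.filter_cons_of_pos hpy, List.filter_cons_of_pos hpy, insertBy_cons]
          simp only [decide_eq_true_eq, hlt, if_false, ih hl']
        · rw [List.filter_cons_of_neg (by simpa using hpy),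
              List.filter_cons_of_neg (by simpa using hpy), ih hl']

theorem filter_insertBy_neg {α : Type} (key : α → String) (p : α → Bool) (a : α)
    (l : List α) (hpa : p a = false) :
    (PySem.List.insertBy (fun x y => decide (key x < key y)) a l).filter p = l.filter p := by
  induction l with
  | nil => simp [insertBy_nil, hpa]
  | cons y l ih =>
      rw [insertBy_cons]
      by_cases hlt : key a < key y
      · simp [hlt, List.filter_cons, hpa]
      · simp only [decide_eq_true_eq, hlt, if_false]
        by_cases hpy : p y = true
        · rw [List.filter_cons_of_pos hpy, List.filter_cons_of_pos hpy, ih]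
        · rw [List.filter_cons_of_neg (by simpa using hpy),
              List.filter_cons_of_neg (by simpa using hpy), ih]

theorem filter_sorted_comm {α : Type} (key : α → String) (p : α → Bool) (xs : List α) :
    (PySem.List.sorted xs key false).filter p = PySem.List.sorted (xs.filter p) key false := by
  induction xs using List.reverseRecOn with
  | nil => rfl
  | append_singleton xs a ih =>
      rw [sorted_snoc, List.filter_append]
      by_cases hpa : p a = true
      · rw [filter_insertBy_pos key p a _ (PySem.List.sorted_pairwise xs key) hpa, ih,
            List.filter_cons_of_pos hpa, List.filter_nil, sorted_snoc]
      · rw [filter_insertBy_neg key p a _ (by simpa using hpa), ih,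
            List.filter_cons_of_neg (by simpa using hpa), List.filter_nil, List.append_nil]

-- the sorted distinct key list -----------------------------------------------
def pvKof (l : List String) : List String :=
  PySem.List.sorted (PySem.Set.ofList l) (fun c => c) false

def pvInsStr (b : String) : List String → List String
  | [] => [b]
  | c :: K => if c < b then c :: pvInsStr b K else b :: c :: K

theorem mem_pvInsStr (b y : String) (K : List String) :
    y ∈ pvInsStr b K ↔ y = b ∨ y ∈ K := by
  induction K with
  | nil => simp [pvInsStr]
  | cons c K ih =>
      by_cases h : c < b
      · simp only [pvInsStr, if_pos h, List.mem_cons, ih]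
        tauto
      · simp only [pvInsStr, if_neg h, List.mem_cons]

theorem pvKof_pairwise (l : List String) : (pvKof l).Pairwise (· < ·) := by
  exact PySem.List.sorted_ofList_pairwise_lt l

theorem mem_pvKof (l : List String) (c : String) : c ∈ pvKof l ↔ c ∈ l := by
  unfold pvKof
  rw [PySem.List.mem_sorted, PySem.Set.mem_ofList]

theorem pvKof_snoc_mem (l : List String) (b : String) (h : b ∈ l) :
    pvKof (l ++ [b]) = pvKof l := by
  unfold pvKof
  have h1 : PySem.Set.ofList (l ++ [b]) = PySem.Set.ofList l := by
    show List.foldl PySem.Set.add PySem.Set.empty (l ++ [b]) = _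
    rw [List.foldl_append]
    show PySem.Set.add (PySem.Set.ofList l) b = _
    unfold PySem.Set.add
    rw [if_pos]
    exact (PySem.Set.contains_iff _ b).mpr ((PySem.Set.mem_ofList l b).mpr h)
  rw [h1]

theorem pvInsStr_perm (b : String) (K : List String) :
    (pvInsStr b K).Perm (b :: K) := by
  induction K with
  | nil => simp [pvInsStr]
  | cons c K ih =>
      by_cases hc : c < b
      · simp only [pvInsStr, if_pos hc]
        exact (ih.cons c).trans (List.Perm.swap b c K)
      · rw [pvInsStr, if_neg hc]

theorem pvInsStr_pairwise (b : String) (K : List String)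
    (hK : K.Pairwise (· < ·)) (hb : b ∉ K) :
    (pvInsStr b K).Pairwise (· < ·) := by
  induction K with
  | nil => simp [pvInsStr]
  | cons c K ih =>
      rcases List.pairwise_cons.mp hK with ⟨hc, hK'⟩
      by_cases hcb : c < b
      · simp only [pvInsStr, if_pos hcb]
        refine List.pairwise_cons.mpr ⟨?_, ih hK' (fun hm => hb (by simp [hm]))⟩
        intro y hy
        rcases (mem_pvInsStr b y K).mp hy with rfl | hy
        · exact hcb
        · exact hc y hy
      · have hbc : b < c := lt_of_le_of_ne (not_lt.mp hcb) (fun hbceq => hb (by simp [hbceq]))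
        simp only [pvInsStr, if_neg hcb]
        refine List.pairwise_cons.mpr ⟨?_, List.pairwise_cons.mpr ⟨hc, hK'⟩⟩
        intro y hy
        rcases List.mem_cons.mp hy with rfl | hy
        · exact hbc
        · exact lt_trans hbc (hc y hy)

theorem pvKof_snoc_fresh (l : List String) (b : String) (h : b ∉ l) :
    pvKof (l ++ [b]) = pvInsStr b (pvKof l) := by
  unfold pvKof
  have h1 : PySem.Set.ofList (l ++ [b]) = PySem.Set.ofList l ++ [b] := by
    show List.foldl PySem.Set.add PySem.Set.empty (l ++ [b]) = _
    rw [List.foldl_append]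
    show PySem.Set.add (PySem.Set.ofList l) b = _
    unfold PySem.Set.add
    rw [if_neg]
    intro hc
    exact h ((PySem.Set.mem_ofList l b).mp ((PySem.Set.contains_iff _ b).mp hc))
  rw [h1]
  apply PySem.List.sorted_eq_of_perm_of_pairwise_lt
  · exact (pvInsStr_perm b (pvKof l)).trans
      ((List.perm_append_singleton b (pvKof l)).symm.trans
        ((PySem.List.sorted_perm (PySem.Set.ofList l) (fun c => c) false).append_right [b]))
  · exact pvInsStr_pairwise b (pvKof l) (pvKof_pairwise l)
      (fun hm => h ((mem_pvKof l b).mp hm))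

theorem pvKof_perm (l l' : List String) (h : l.Perm l') : pvKof l = pvKof l' := by
  unfold pvKof
  rw [PySem.List.sorted_id_eq_sorted_id_iff_perm]
  rw [List.perm_ext_iff_of_nodup (PySem.Set.nodup_ofList l) (PySem.Set.nodup_ofList l')]
  intro a
  rw [PySem.Set.mem_ofList, PySem.Set.mem_ofList]
  exact ⟨fun ha => h.mem_iff.mp ha, fun ha => h.mem_iff.mpr ha⟩

-- the stable sort groups equal keys: sorted xs key = concat of its key-classes
theorem flatMap_congr_mem {α β : Type} (K : List α) (f g : α → List β)
    (h : ∀ c ∈ K, f c = g c) : K.flatMap f = K.flatMap g := by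
  induction K with
  | nil => rfl
  | cons c K ih =>
      simp only [List.flatMap_cons, h c (by simp), ih (fun c' hc' => h c' (by simp [hc']))]

theorem ins_flat_mem {α : Type} (key : α → String) (a : α) (K : List String)
    (hK : K.Pairwise (· < ·)) (g g' : String → List α)
    (hg : ∀ c ∈ K, ∀ t ∈ g c, key t = c)
    (hg' : ∀ c ∈ K, g' c = g c ++ (if key a == c then [a] else []))
    (hmem : key a ∈ K) :
    PySem.List.insertBy (fun x y => decide (key x < key y)) a (K.flatMap g) =
      K.flatMap g' := by
  induction K with
  | nil => cases hmem
  | cons c K ih =>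
      rcases List.pairwise_cons.mp hK with ⟨hc, hK'⟩
      rw [List.flatMap_cons, List.flatMap_cons]
      by_cases hac : key a = c
      · rw [insertBy_append_no_trigger _ _ _ _ (fun y hy => by
          simp [hg c (by simp) y hy, hac])]
        rw [insertBy_all_trigger _ _ _ (fun y hy => by
          rcases List.mem_flatMap.mp hy with ⟨c', hc', hy'⟩
          have h1 := hg c' (by simp [hc']) y hy'
          have h2 := hc c' hc'
          simp [h1, hac ▸ h2])]
        rw [hg' c (by simp), flatMap_congr_mem K g' g (fun c' hc' => by
          rw [hg' c' (by simp [hc'])]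
          have hne : (key a == c') = false := by
            have := hc c' hc'
            simp only [beq_eq_false_iff_ne]
            exact fun hh => absurd (hac.symm.trans hh) (ne_of_lt this)
          simp [hne])]
        simp [hac, List.append_assoc]
      · have hmem' : key a ∈ K := by
          rcases List.mem_cons.mp hmem with h | h
          · exact absurd h hac
          · exact h
        have hclt : c < key a := hc (key a) hmem'
        rw [insertBy_append_no_trigger _ _ _ _ (fun y hy => by
          have := hg c (by simp) y hy
          simp only [this, decide_eq_false_iff_not]
          exact fun hlt => absurd (lt_trans hclt hlt) (lt_irrefl c))]
        rw [ih hK' (fun c' hc' t ht => hg c' (by simp [hc']) t ht)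
              (fun c' hc' => hg' c' (by simp [hc'])) hmem']
        rw [hg' c (by simp)]
        have hne : (key a == c) = false := by simpa using hac
        simp [hne]

theorem ins_flat_fresh {α : Type} (key : α → String) (a : α) (K : List String)
    (hK : K.Pairwise (· < ·)) (g g' : String → List α)
    (hg : ∀ c ∈ K, ∀ t ∈ g c, key t = c)
    (hg' : ∀ c ∈ K, g' c = g c ++ (if key a == c then [a] else []))
    (hga : g' (key a) = [a])
    (hfresh : key a ∉ K) :
    PySem.List.insertBy (fun x y => decide (key x < key y)) a (K.flatMap g) =
      (pvInsStr (key a) K).flatMap g' := by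
  induction K with
  | nil => simp [pvInsStr, insertBy_nil, hga]
  | cons c K ih =>
      rcases List.pairwise_cons.mp hK with ⟨hc, hK'⟩
      have hne : key a ≠ c := fun hh => hfresh (by simp [hh])
      rw [List.flatMap_cons]
      by_cases hlt : c < key a
      · rw [insertBy_append_no_trigger _ _ _ _ (fun y hy => by
          have := hg c (by simp) y hy
          simp only [this, decide_eq_false_iff_not]
          exact fun hlt2 => absurd (lt_trans hlt hlt2) (lt_irrefl c))]
        rw [ih hK' (fun c' hc' t ht => hg c' (by simp [hc']) t ht)
              (fun c' hc' => hg' c' (by simp [hc']))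
              (fun hm => hfresh (by simp [hm]))]
        rw [pvInsStr, if_pos hlt, List.flatMap_cons, hg' c (by simp)]
        have hbeq : (key a == c) = false := by simpa using hne
        simp [hbeq]
      · have halt : key a < c := lt_of_le_of_ne (not_lt.mp hlt) hne
        rw [insertBy_all_trigger _ _ _ (fun y hy => by
          rcases List.mem_append.mp hy with hy | hy
          · simp [hg c (by simp) y hy, halt]
          · rcases List.mem_flatMap.mp hy with ⟨c', hc', hy'⟩
            have h1 := hg c' (by simp [hc']) y hy'
            have h2 := hc c' hc'
            simp only [h1, decide_eq_true_eq]
            exact lt_trans halt h2)]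
        rw [pvInsStr, if_neg hlt, List.flatMap_cons, List.flatMap_cons, hga,
            hg' c (by simp)]
        have hbeq : (key a == c) = false := by simpa using hne
        rw [flatMap_congr_mem K g' g (fun c' hc' => by
          rw [hg' c' (by simp [hc'])]
          have : (key a == c') = false := by
            simp only [beq_eq_false_iff_ne]
            exact fun hh => hfresh (by simp [hh, hc'])
          simp [this])]
        simp [hbeq]

theorem sorted_eq_flatMap {α : Type} (key : α → String) (xs : List α) :
    PySem.List.sorted xs key false =
      (pvKof (xs.map key)).flatMap (fun c => xs.filter (fun x => key x == c)) := by
  induction xs using List.reverseRecOn with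
  | nil => rfl
  | append_singleton xs a ih =>
      rw [sorted_snoc, ih, List.map_append]
      simp only [List.map_cons, List.map_nil]
      have hgeq : ∀ c, (xs ++ [a]).filter (fun x => key x == c) =
          xs.filter (fun x => key x == c) ++ (if key a == c then [a] else []) := by
        intro c
        rw [List.filter_append]
        congr 1
        simp [List.filter_cons]
      have hg : ∀ c ∈ pvKof (xs.map key), ∀ t ∈ xs.filter (fun x => key x == c), key t = c := by
        intro c _ t ht
        simpa using (List.mem_filter.mp ht).2
      by_cases hm : key a ∈ xs.map key
      · rw [pvKof_snoc_mem (xs.map key) (key a) (by simpa using hm)]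
        exact ins_flat_mem key a (pvKof (xs.map key)) (pvKof_pairwise _)
          _ _ hg (fun c _ => hgeq c) ((mem_pvKof _ _).mpr hm)
      · rw [pvKof_snoc_fresh (xs.map key) (key a) (by simpa using hm)]
        refine ins_flat_fresh key a (pvKof (xs.map key)) (pvKof_pairwise _)
          _ _ hg (fun c _ => hgeq c) ?_ (fun hk => hm ((mem_pvKof _ _).mp hk))
        rw [hgeq (key a)]
        have hnil : xs.filter (fun x => key x == key a) = [] := by
          rw [List.filter_eq_nil_iff]
          intro x hx
          simp only [beq_iff_eq]
          exact fun hh => hm (hh ▸ List.mem_map_of_mem hx)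
        simp [hnil]

-- A-side foldl reshaping -----------------------------------------------------
theorem foldl_emit {α : Type} (f : α → String) :
    ∀ (l : List α) (init : List String),
      l.foldl (fun acc x => acc ++ [f x]) init = init ++ l.map f := by
  intro l
  induction l with
  | nil => simp
  | cons x l ih => intro init; simp [ih]

-- A-side section building in one shape
theorem foldl_sections (K : List String) (B : String → List (List (String × String))) :
    ∀ (init : List String),
      K.foldl (fun acc scope =>
          (B scope).foldl (fun acc2 tool => acc2 ++ [pvBullet tool]) (acc ++ [pvLabel scope ++ ":"]))
        init
        = init ++ K.flatMap (fun c => (pvLabel c ++ ":") :: (B c).map pvBullet) := by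
  induction K with
  | nil => intro init; simp
  | cons c K ih =>
      intro init
      rw [List.foldl_cons, foldl_emit, ih, List.flatMap_cons]
      simp [List.append_assoc]

-- B-side scan ----------------------------------------------------------------
def pvStep (st : List String × Option String) (tool : List (String × String)) :
    List String × Option String :=
  if st.2 = some (pvKS tool) then (st.1 ++ [pvBullet tool], st.2)
  else (st.1 ++ [pvLabel (pvKS tool) ++ ":", pvBullet tool], some (pvKS tool))

theorem scan_same_scope (c : String) :
    ∀ (bs : List (List (String × String))), (∀ t ∈ bs, pvKS t = c) →
      ∀ acc, bs.foldl pvStep (acc, some c) = (acc ++ bs.map pvBullet, some c) := by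
  intro bs
  induction bs with
  | nil => intro _ acc; simp
  | cons t bs ih =>
      intro h acc
      have ht : pvKS t = c := h t (by simp)
      rw [List.foldl_cons]
      have hstep : pvStep (acc, some c) t = (acc ++ [pvBullet t], some c) := by
        unfold pvStep
        rw [if_pos (by rw [ht])]
      rw [hstep, ih (fun t' ht' => h t' (by simp [ht']))]
      simp

theorem scan_blocks :
    ∀ (K : List String), K.Pairwise (· < ·) →
      ∀ (blocks : String → List (List (String × String))),
        (∀ c ∈ K, blocks c ≠ [] ∧ ∀ t ∈ blocks c, pvKS t = c) →
      ∀ (acc : List String) (prev : Option String), (∀ c ∈ K, prev ≠ some c) →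
        ((K.flatMap blocks).foldl pvStep (acc, prev)).1 =
          acc ++ K.flatMap (fun c => (pvLabel c ++ ":") :: (blocks c).map pvBullet) := by
  intro K
  induction K with
  | nil => intro _ _ _ acc prev _; simp
  | cons c K ih =>
      intro hK blocks hb acc prev hprev
      rcases List.pairwise_cons.mp hK with ⟨hc, hK'⟩
      rcases hb c (by simp) with ⟨hne, hscope⟩
      rcases List.exists_cons_of_ne_nil hne with ⟨t, bs, hbc⟩
      rw [List.flatMap_cons, List.foldl_append, hbc, List.foldl_cons]
      have ht : pvKS t = c := hscope t (by rw [hbc]; simp)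
      have hstep : pvStep (acc, prev) t =
          (acc ++ [pvLabel c ++ ":", pvBullet t], some c) := by
        unfold pvStep
        rw [ht, if_neg (hprev c (by simp))]
      rw [hstep, scan_same_scope c bs (fun t' ht' => hscope t' (by rw [hbc]; simp [ht'])) _]
      rw [ih hK' blocks (fun c' hc' => hb c' (by simp [hc']))
            _ (some c) (fun c' hc' hh => by
              have := hc c' hc'
              exact absurd (Option.some.inj hh) (ne_of_lt this))]
      rw [List.flatMap_cons, hbc]
      simp [List.append_assoc]

-- ===== VERDICT (by name: the statement is the Claim_ definition above) =====
theorem format_available_tools_py_spec : Claim_equal_format_available_tools_py := by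
  intro ts _
  unfold Spec_format_available_tools_py
  by_cases hts : ts = []
  · subst hts; rfl
  · unfold format_available_tools_py format_available_tools_py_alt
    rw [if_neg hts, if_neg hts]
    simp only []
    congr 1
    -- A side: the grouping dict's lookups and keys
    have hgetD : ∀ c,
        (ts.foldl (fun d tool => d.modify (pvGetD tool "scope" "unknown") [] (fun l => l ++ [tool]))
          PySem.Dict.empty).getD c []
          = ts.filter (fun t => pvGetD t "scope" "unknown" == c) := by
      intro c
      have h1 : ts.foldl (fun d tool => d.modify (pvGetD tool "scope" "unknown") [] (fun l => l ++ [tool]))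
            PySem.Dict.empty
          = (ts.map (fun t => (pvGetD t "scope" "unknown", t))).foldl
              (fun d p => d.modify p.1 [] (fun l => l ++ [p.2])) PySem.Dict.empty := by
        rw [List.foldl_map]
      rw [h1, PySem.Dict.getD_foldl_modify_append]
      simp only [List.filter_map, List.map_map]
      simp [Function.comp_def]
    have hkeys :
        (ts.foldl (fun d tool => d.modify (pvGetD tool "scope" "unknown") [] (fun l => l ++ [tool]))
          PySem.Dict.empty).keys
          = PySem.Set.ofList (ts.map (fun t => pvGetD t "scope" "unknown")) := by
      have h := PySem.Dict.keys_foldl_modify_key ts (fun t => pvGetD t "scope" "unknown")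
        ([] : List (List (String × String))) (fun _ t => fun l => l ++ [t]) PySem.Dict.empty
      exact h.trans (by rfl)
    simp only [hgetD]
    rw [hkeys]
    rw [foldl_sections
      (PySem.List.sorted (PySem.Set.ofList (ts.map (fun t => pvGetD t "scope" "unknown"))) (fun c => c) false)
      (fun c => PySem.List.sorted (ts.filter (fun t => pvGetD t "scope" "unknown" == c))
        (fun t => pvGetD t "name" "") false)
      ["I can call the following registered tools:"]]
    -- B side: the globally sorted list is the concatenation of the sorted scope groups
    have horder :
        PySem.List.sorted (PySem.List.sorted ts (fun t => pvGetD t "name" "") false)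
            (fun t => pvGetD t "scope" "unknown") false
          = (pvKof (ts.map (fun t => pvGetD t "scope" "unknown"))).flatMap
              (fun c => PySem.List.sorted (ts.filter (fun t => pvGetD t "scope" "unknown" == c))
                (fun t => pvGetD t "name" "") false) := by
      rw [sorted_eq_flatMap (fun t => pvGetD t "scope" "unknown")
            (PySem.List.sorted ts (fun t => pvGetD t "name" "") false)]
      rw [pvKof_perm
            ((PySem.List.sorted ts (fun t => pvGetD t "name" "") false).map
              (fun t => pvGetD t "scope" "unknown"))
            (ts.map (fun t => pvGetD t "scope" "unknown"))
            ((PySem.List.sorted_perm ts (fun t => pvGetD t "name" "") false).map _)]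
      exact flatMap_congr_mem _ _ _ (fun c _ =>
        filter_sorted_comm (fun t => pvGetD t "name" "")
          (fun t => pvGetD t "scope" "unknown" == c) ts)
    rw [horder]
    -- B side: the scan over the grouped concatenation
    have hK : (pvKof (ts.map (fun t => pvGetD t "scope" "unknown"))).Pairwise (· < ·) :=
      pvKof_pairwise _
    have hb : ∀ c ∈ pvKof (ts.map (fun t => pvGetD t "scope" "unknown")),
        (PySem.List.sorted (ts.filter (fun t => pvGetD t "scope" "unknown" == c))
          (fun t => pvGetD t "name" "") false) ≠ [] ∧
        ∀ t ∈ (PySem.List.sorted (ts.filter (fun t => pvGetD t "scope" "unknown" == c))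
          (fun t => pvGetD t "name" "") false), pvKS t = c := by
      intro c hc
      constructor
      · intro hnil
        rw [PySem.List.sorted_eq_nil_iff, List.filter_eq_nil_iff] at hnil
        rcases List.mem_map.mp ((mem_pvKof _ _).mp hc) with ⟨t, ht, htc⟩
        exact hnil t ht (by simp [htc])
      · intro t ht
        have := (List.mem_filter.mp ((PySem.List.mem_sorted _ _ _ _).mp ht)).2
        simpa [pvKS] using this
    have hscan := scan_blocks (pvKof (ts.map (fun t => pvGetD t "scope" "unknown"))) hK
      (fun c => PySem.List.sorted (ts.filter (fun t => pvGetD t "scope" "unknown" == c))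
        (fun t => pvGetD t "name" "") false) hb
      ["I can call the following registered tools:"] none (by simp)
    exact hscan.symm
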